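-- pv_equiv track=rewrite | github.com/jreyes33/advent-of-code | 2017/python/03.py | first_greater_than
-- ===== SOURCE A (Python) =====
-- def first_greater_than(n):
--     x = 0
--     y = 0
--     directions = [(1, 0), (0, 1), (-1, 0), (0, -1)]
--     neighbors = directions + [(1, 1), (1, -1), (-1, 1), (-1, -1)]
--     dir_count = len(directions)
--     dir_idx = -1
--     cells = {(0, 0): 1}
--     while True:
--         new_dir_idx = (dir_idx + 1) % dir_count
--         new_dir = directions[new_dir_idx]
--         new_pos = (x + new_dir[0], y + new_dir[1])
--         if new_pos in cells:
--             same_dir = directions[dir_idx]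
--             new_pos = (x + same_dir[0], y + same_dir[1])
--         else:
--             dir_idx = new_dir_idx
--         x = new_pos[0]
--         y = new_pos[1]
--         value = 0
--         for neighbor in neighbors:
--             neighbor_pos = (x + neighbor[0], y + neighbor[1])
--             value += cells.get(neighbor_pos, 0)
--         cells[new_pos] = value
--         if value > n:
--             return value
-- ===== SOURCE B (Python) =====
-- def first_greater_than(n):
--     directions = [(1, 0), (0, 1), (-1, 0), (0, -1)]
--     neighbors = directions + [(1, 1), (1, -1), (-1, 1), (-1, -1)]
--     cells = {(0, 0): 1}
--     x = 0
--     y = 0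
--     dir_idx = 0
--     run_length = 1
--     steps_left = 1
--     runs_done = 0
--     while True:
--         dx, dy = directions[dir_idx]
--         x += dx
--         y += dy
--         value = sum(cells.get((x + ndx, y + ndy), 0) for ndx, ndy in neighbors)
--         cells[(x, y)] = value
--         if value > n:
--             return value
--         steps_left -= 1
--         if steps_left == 0:
--             dir_idx = (dir_idx + 1) % 4
--             runs_done += 1
--             if runs_done % 2 == 0:
--                 run_length += 1
--             steps_left = run_length
-- ===== Notes on version B (the rewrite author's own statement) =====
-- stated objective: alternative
-- what changed: B generates the spiral by the run-length step-count schedule (cycle right/up/left/down, run lengths 1,1,2,2,3,3,...) instead of A's probe-the-dict turning rule ('if new_pos in cells'), so the membership test disappears.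
import Mathlib
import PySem

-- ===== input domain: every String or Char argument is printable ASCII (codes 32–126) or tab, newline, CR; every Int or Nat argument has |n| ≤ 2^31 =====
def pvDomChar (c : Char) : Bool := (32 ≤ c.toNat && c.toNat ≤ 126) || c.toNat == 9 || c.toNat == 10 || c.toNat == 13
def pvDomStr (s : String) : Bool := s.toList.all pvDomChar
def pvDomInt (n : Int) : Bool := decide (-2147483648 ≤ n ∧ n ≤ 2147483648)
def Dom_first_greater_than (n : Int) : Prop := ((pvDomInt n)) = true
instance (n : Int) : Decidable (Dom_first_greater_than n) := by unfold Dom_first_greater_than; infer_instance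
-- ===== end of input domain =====

-- B replaces A's membership-test turning rule by the run-length step-count schedule
-- (1,1,2,2,3,3,…), removing the 'new_pos in cells' probe; objective: alternative.
-- Both loops run until the spiral value exceeds n; with |n| ≤ 2^31 (Dom) the value
-- exceeds n within 145 steps, so both ports carry fuel 150 (a totality guard only;
-- on exhaustion both return 0, so the ports agree for every n).

-- ===== PORT A =====
def fgtDirections : List (Int × Int) := [(1, 0), (0, 1), (-1, 0), (0, -1)]
def fgtNeighbors : List (Int × Int) :=
  fgtDirections ++ [(1, 1), (1, -1), (-1, 1), (-1, -1)]

-- one iteration of A's `while True` body (n-independent part): state is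
-- ((x, y), dir_idx, cells); returns the new state and the value computed.
-- directions[i] is accessed with i ∈ {-1,0,1,2,3}, always in range, so the
-- `.getD (0, 0)` default of the pyGet? lookup is unreachable.
def fgtStepA : (Int × Int) × Int × PySem.Dict (Int × Int) Int →
    ((Int × Int) × Int × PySem.Dict (Int × Int) Int) × Int
  | ((x, y), dir_idx, cells) =>
    let new_dir_idx := PySem.Int.mod (dir_idx + 1) 4
    let new_dir := (PySem.List.pyGet? fgtDirections new_dir_idx).getD (0, 0)
    let np0 := (x + new_dir.1, y + new_dir.2)
    let (new_pos, dir_idx') :=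
      if cells.contains np0 then
        let same_dir := (PySem.List.pyGet? fgtDirections dir_idx).getD (0, 0)
        ((x + same_dir.1, y + same_dir.2), dir_idx)
      else (np0, new_dir_idx)
    let x := new_pos.1
    let y := new_pos.2
    let value := fgtNeighbors.foldl
      (fun v nb => v + cells.getD (x + nb.1, y + nb.2) 0) 0
    (((x, y), dir_idx', cells.insert new_pos value), value)

def fgtLoopA (n : Int) : Nat → (Int × Int) × Int × PySem.Dict (Int × Int) Int → Int
  | 0, _ => 0
  | fuel + 1, s =>
    let r := fgtStepA s
    if r.2 > n then r.2 else fgtLoopA n fuel r.1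

def first_greater_than (n : Int) : Int :=
  fgtLoopA n 150 ((0, 0), -1, PySem.Dict.ofList [((0, 0), 1)])

-- ===== PORT B =====
-- one iteration of B's `while True` body: state is
-- ((x, y), dir_idx, run_length, steps_left, runs_done, cells).
def fgtStepB : (Int × Int) × Int × Int × Int × Int × PySem.Dict (Int × Int) Int →
    ((Int × Int) × Int × Int × Int × Int × PySem.Dict (Int × Int) Int) × Int
  | ((x, y), dir_idx, run_length, steps_left, runs_done, cells) =>
    let d := (PySem.List.pyGet? fgtDirections dir_idx).getD (0, 0)
    let x := x + d.1
    let y := y + d.2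
    let value := (fgtNeighbors.map (fun nb => cells.getD (x + nb.1, y + nb.2) 0)).sum
    let cells := cells.insert (x, y) value
    let steps_left := steps_left - 1
    if steps_left = 0 then
      let dir_idx := PySem.Int.mod (dir_idx + 1) 4
      let runs_done := runs_done + 1
      let run_length := if PySem.Int.mod runs_done 2 = 0 then run_length + 1 else run_length
      (((x, y), dir_idx, run_length, run_length, runs_done, cells), value)
    else
      (((x, y), dir_idx, run_length, steps_left, runs_done, cells), value)

def fgtLoopB (n : Int) :
    Nat → (Int × Int) × Int × Int × Int × Int × PySem.Dict (Int × Int) Int → Int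
  | 0, _ => 0
  | fuel + 1, s =>
    let r := fgtStepB s
    if r.2 > n then r.2 else fgtLoopB n fuel r.1

def first_greater_than_alt (n : Int) : Int :=
  fgtLoopB n 150 ((0, 0), 0, 1, 1, 0, PySem.Dict.ofList [((0, 0), 1)])

-- ===== PRECONDITION & SPEC =====
def Spec_first_greater_than (n : Int) (out : Int) : Prop := out = first_greater_than_alt n
instance (n : Int) (out : Int) : Decidable (Spec_first_greater_than n out) := by unfold Spec_first_greater_than; infer_instance

-- ===== CLAIM (what is proved, stated in full; the proofs are below) =====
def Claim_equal_first_greater_than : Prop := ∀ (n : Int), Dom_first_greater_than n → Spec_first_greater_than n (first_greater_than n)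

-- ===== LEMMAS AND PROOFS =====

-- the first element of vs exceeding n (0 if none): what both loops compute from
-- their (n-independent) streams of values.
def fgtFind (n : Int) : List Int → Int
  | [] => 0
  | v :: vs => if v > n then v else fgtFind n vs

def fgtValsA : Nat → (Int × Int) × Int × PySem.Dict (Int × Int) Int → List Int
  | 0, _ => []
  | fuel + 1, s => (fgtStepA s).2 :: fgtValsA fuel (fgtStepA s).1

def fgtValsB : Nat →
    (Int × Int) × Int × Int × Int × Int × PySem.Dict (Int × Int) Int → List Int
  | 0, _ => []
  | fuel + 1, s => (fgtStepB s).2 :: fgtValsB fuel (fgtStepB s).1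

theorem fgtLoopA_eq_find (n : Int) (fuel : Nat) :
    ∀ s, fgtLoopA n fuel s = fgtFind n (fgtValsA fuel s) := by
  induction fuel with
  | zero => intro s; rfl
  | succ f ih => intro s; simp [fgtLoopA, fgtValsA, fgtFind, ih]

theorem fgtLoopB_eq_find (n : Int) (fuel : Nat) :
    ∀ s, fgtLoopB n fuel s = fgtFind n (fgtValsB fuel s) := by
  induction fuel with
  | zero => intro s; rfl
  | succ f ih => intro s; simp [fgtLoopB, fgtValsB, fgtFind, ih]

-- the two spiral walks emit the same stream of values (a closed computation).
set_option maxRecDepth 100000 in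
set_option maxHeartbeats 4000000 in
theorem fgtVals_eq :
    fgtValsA 150 ((0, 0), -1, PySem.Dict.ofList [((0, 0), 1)]) =
      fgtValsB 150 ((0, 0), 0, 1, 1, 0, PySem.Dict.ofList [((0, 0), 1)]) := by
  decide

-- ===== VERDICT (by name: the statement is the Claim_ definition above) =====
theorem first_greater_than_spec : Claim_equal_first_greater_than := by
  intro n _
  unfold Spec_first_greater_than first_greater_than first_greater_than_alt
  rw [fgtLoopA_eq_find, fgtLoopB_eq_find, fgtVals_eq]
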